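-- pv_equiv track=rewrite | github.com/chan-gwak/chembl_lstm | chembl_lstm.py | parse_smiles
-- ===== SOURCE A (Python) =====
-- spec_words = ['Cl','Br','=O'] # special words that network should identify
--
-- def parse_smiles(smiles_str):
--
-- 	# Pad the left square brackets with a space on the left,
-- 	# and the right brackets with a space on the right.
-- 	proc_str = smiles_str.replace('[',' [')
-- 	proc_str =   proc_str.replace(']','] ')
--
-- 	# Parsing Stage 1: Split out the items like ' [***] '.
-- 	proc_list = proc_str.split()
--
-- 	# Initialize the finalized processed list.
-- 	fproc_list = []
--
-- 	# Parsing Stage 2: Split out the special words, and split the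
-- 	# remaining characters.
-- 	# Add the square-bracketed pieces to the final list.
-- 	# For each special word (not already found in square brackets),
-- 	# pad it with spaces on both sides.
-- 	# After padding all such words, split to separate them.
-- 	# Finally, completely split all non-special words.
-- 	for piece in proc_list:
-- 		if ('[' in piece) or (']' in piece):
-- 			fproc_list += [piece]
-- 		else:
-- 			for word in spec_words:
-- 				piece = piece.replace(word,' '+word+' ')
-- 			proc_piece = piece.split()
-- 			for subpiece in proc_piece:
-- 				if subpiece in spec_words:
-- 					fproc_list += [subpiece]
-- 				else:
-- 					fproc_list += list(subpiece)
--
-- 	return fproc_list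
-- ===== SOURCE B (Python) =====
-- spec_words = ['Cl', 'Br', '=O']  # special words that network should identify
--
-- def parse_smiles(smiles_str):
-- 	# Single left-to-right scan: chunks end at whitespace, just before '[',
-- 	# and just after ']'.  A chunk containing a bracket is one token; any
-- 	# other chunk is tokenized greedily into special words / single chars.
-- 	tokens = []
-- 	chunk = []
--
-- 	def flush():
-- 		if not chunk:
-- 			return
-- 		piece = ''.join(chunk)
-- 		if '[' in piece or ']' in piece:
-- 			tokens.append(piece)
-- 		else:
-- 			i = 0
-- 			n = len(piece)
-- 			while i < n:
-- 				for w in spec_words: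
-- 					if piece.startswith(w, i):
-- 						tokens.append(w)
-- 						i += len(w)
-- 						break
-- 				else:
-- 					tokens.append(piece[i])
-- 					i += 1
-- 		chunk.clear()
--
-- 	for ch in smiles_str:
-- 		if ch.isspace():
-- 			flush()
-- 		elif ch == '[':
-- 			flush()
-- 			chunk.append(ch)
-- 		elif ch == ']':
-- 			chunk.append(ch)
-- 			flush()
-- 		else:
-- 			chunk.append(ch)
-- 	flush()
-- 	return tokens
-- ===== Notes on version B (the rewrite author's own statement) =====
-- stated objective: alternative
-- what changed: A pads brackets and the three special two-character words with spaces via repeated str.replace passes and re-splits the intermediate strings; B makes a single left-to-right scan with an explicit chunk buffer (flushed at whitespace, before a left bracket, after a right bracket) and a greedy in-place special-word matcher, building no intermediate strings.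
import Mathlib
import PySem

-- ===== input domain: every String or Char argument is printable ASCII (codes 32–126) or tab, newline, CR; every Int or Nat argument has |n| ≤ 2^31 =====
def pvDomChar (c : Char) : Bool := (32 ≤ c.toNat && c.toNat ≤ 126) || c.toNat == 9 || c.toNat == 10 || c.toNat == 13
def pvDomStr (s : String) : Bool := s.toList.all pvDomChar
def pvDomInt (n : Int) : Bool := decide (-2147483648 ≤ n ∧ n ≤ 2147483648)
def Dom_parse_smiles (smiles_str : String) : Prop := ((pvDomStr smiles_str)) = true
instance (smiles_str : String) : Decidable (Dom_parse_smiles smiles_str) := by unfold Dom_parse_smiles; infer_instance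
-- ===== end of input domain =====

-- B replaces A's replace/split passes by one left-to-right scan with an explicit chunk buffer
-- and a greedy special-word tokenizer (objective: alternative decomposition, same cost).

-- ===== PORT A =====
def spec_words : List String := ["Cl", "Br", "=O"]

def parse_smiles (smiles_str : String) : List String :=
  let proc_str := PySem.Str.replace smiles_str "[" " ["
  let proc_str := PySem.Str.replace proc_str "]" "] "
  let proc_list := PySem.Str.split₀ proc_str
  proc_list.foldl (fun fproc_list piece =>
    if PySem.Str.isIn "[" piece || PySem.Str.isIn "]" piece then
      fproc_list ++ [piece]
    else
      let piece := spec_words.foldl (fun p word => PySem.Str.replace p word (" " ++ word ++ " ")) piece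
      let proc_piece := PySem.Str.split₀ piece
      proc_piece.foldl (fun fp subpiece =>
        if subpiece ∈ spec_words then fp ++ [subpiece]
        else fp ++ subpiece.toList.map (fun c => String.ofList [c])) fproc_list) []

-- ===== PORT B =====
-- the inner while loop of Source B's flush(): at each position greedily match 'Cl','Br','=O'
-- (in that order), otherwise emit the single character
def pvTokenize : List Char → List String
  | [] => []
  | [c] => [String.ofList [c]]
  | c :: d :: rest =>
    if c = 'C' ∧ d = 'l' then "Cl" :: pvTokenize rest
    else if c = 'B' ∧ d = 'r' then "Br" :: pvTokenize rest
    else if c = '=' ∧ d = 'O' then "=O" :: pvTokenize rest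
    else String.ofList [c] :: pvTokenize (d :: rest)

-- Source B's flush()
def pvFlush (chunk : List Char) (tokens : List String) : List String :=
  if chunk = [] then tokens
  else if PySem.Str.isIn "[" (String.ofList chunk) || PySem.Str.isIn "]" (String.ofList chunk) then
    tokens ++ [String.ofList chunk]
  else tokens ++ pvTokenize chunk

-- Source B's for-loop over the characters
def pvScan : List Char → List Char → List String → List String
  | [], chunk, tokens => pvFlush chunk tokens
  | ch :: rest, chunk, tokens =>
    if PySem.Chars.isspace ch then pvScan rest [] (pvFlush chunk tokens)
    else if ch = '[' then pvScan rest ['['] (pvFlush chunk tokens)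
    else if ch = ']' then pvScan rest [] (pvFlush (chunk ++ [']']) tokens)
    else pvScan rest (chunk ++ [ch]) tokens

def parse_smiles_alt (smiles_str : String) : List String :=
  pvScan smiles_str.toList [] []

-- ===== PRECONDITION & SPEC =====
def Spec_parse_smiles (smiles_str : String) (out : List String) : Prop := out = parse_smiles_alt smiles_str
instance (smiles_str : String) (out : List String) : Decidable (Spec_parse_smiles smiles_str out) := by unfold Spec_parse_smiles; infer_instance

-- ===== CLAIM (what is proved, stated in full; the proofs are below) =====
def Claim_equal_parse_smiles : Prop := ∀ (smiles_str : String), Dom_parse_smiles smiles_str → Spec_parse_smiles smiles_str (parse_smiles smiles_str)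

-- ===== LEMMAS AND PROOFS =====

-- proof-side canonical forms -------------------------------------------------

-- str.split() as a clean recursion (cur is the reversed current word)
def pvWgo : List Char → List Char → List (List Char)
  | [], cur => if cur = [] then [] else [cur.reverse]
  | c :: rest, cur =>
    if PySem.Chars.isspace c then
      (if cur = [] then pvWgo rest [] else cur.reverse :: pvWgo rest [])
    else pvWgo rest (c :: cur)

-- replace of a one-char pattern, as a flatMap
def pvRep1 (a : Char) (new : List Char) (l : List Char) : List Char :=
  l.flatMap (fun c => if c = a then new else [c])

-- replace of a two-char pattern, as a recursion
def pvRep2 (a b : Char) (new : List Char) : List Char → List Char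
  | x :: y :: rest =>
    if x = a ∧ y = b then new ++ pvRep2 a b new rest
    else x :: pvRep2 a b new (y :: rest)
  | l => l

-- A's two bracket-padding replaces, fused into one flatMap
def pvPad (c : Char) : List Char :=
  if c = '[' then [' ', '['] else if c = ']' then [']', ' '] else [c]

-- A's three special-word replaces, fused into one pass (two stages)
def pvMark2 : List Char → List Char
  | [] => []
  | [c] => [c]
  | c :: d :: rest =>
    if c = 'C' ∧ d = 'l' then ' ' :: 'C' :: 'l' :: ' ' :: pvMark2 rest
    else if c = 'B' ∧ d = 'r' then ' ' :: 'B' :: 'r' :: ' ' :: pvMark2 rest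
    else c :: pvMark2 (d :: rest)

def pvMarkAll : List Char → List Char
  | [] => []
  | [c] => [c]
  | c :: d :: rest =>
    if c = 'C' ∧ d = 'l' then ' ' :: 'C' :: 'l' :: ' ' :: pvMarkAll rest
    else if c = 'B' ∧ d = 'r' then ' ' :: 'B' :: 'r' :: ' ' :: pvMarkAll rest
    else if c = '=' ∧ d = 'O' then ' ' :: '=' :: 'O' :: ' ' :: pvMarkAll rest
    else c :: pvMarkAll (d :: rest)

-- chunking of the original characters (cur is the reversed current chunk)
def pvCgo : List Char → List Char → List (List Char)
  | [], cur => if cur = [] then [] else [cur.reverse]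
  | c :: rest, cur =>
    if PySem.Chars.isspace c then
      (if cur = [] then pvCgo rest [] else cur.reverse :: pvCgo rest [])
    else if c = '[' then
      (if cur = [] then pvCgo rest ['['] else cur.reverse :: pvCgo rest ['['])
    else if c = ']' then (']' :: cur).reverse :: pvCgo rest []
    else pvCgo rest (c :: cur)

def pvWordsL : List (List Char) := [['C', 'l'], ['B', 'r'], ['=', 'O']]

def pvExplode (l : List Char) : List String := l.map (fun c => String.ofList [c])

def pvClassify (sub : List Char) : List String :=
  if sub ∈ pvWordsL then [String.ofList sub] else pvExplode sub

-- per-piece processing, A's way and B's way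
def pvPieceA (l : List Char) : List String :=
  if PySem.Chars.isIn ['['] l || PySem.Chars.isIn [']'] l then [String.ofList l]
  else (PySem.Chars.split₀ (pvMarkAll l)).flatMap pvClassify

def pvPieceB (l : List Char) : List String :=
  if PySem.Chars.isIn ['['] l || PySem.Chars.isIn [']'] l then [String.ofList l]
  else pvTokenize l

-- split() --------------------------------------------------------------------

lemma pv_split_go_eq (l : List Char) : ∀ (cur : List Char) (acc : List (List Char)),
    PySem.Chars.split₀.go l cur acc = acc.reverse ++ pvWgo l cur := by
  induction l with
  | nil =>
    intro cur acc
    rw [PySem.Chars.split₀.go, pvWgo]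
    by_cases h : cur = [] <;> simp [h]
  | cons c rest ih =>
    intro cur acc
    rw [PySem.Chars.split₀.go, pvWgo]
    by_cases hs : PySem.Chars.isspace c <;> by_cases h : cur = [] <;>
      simp [hs, h, ih]

lemma pv_split₀_eq (l : List Char) : PySem.Chars.split₀ l = pvWgo l [] := by
  rw [PySem.Chars.split₀, pv_split_go_eq]; rfl

-- replace() ------------------------------------------------------------------

lemma pv_replace_go_one (a : Char) (new : List Char) (fuel : Nat) :
    ∀ l acc : List Char, l.length ≤ fuel →
    PySem.Chars.replace.go [a] new fuel l acc = acc.reverse ++ pvRep1 a new l := by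
  induction fuel with
  | zero =>
    intro l acc h
    rw [PySem.Chars.replace.go]
    simp at h; simp [h, pvRep1]
  | succ n ih =>
    intro l acc h
    match l with
    | [] => rw [PySem.Chars.replace.go] <;> simp [pvRep1]
    | c :: t =>
      rw [PySem.Chars.replace.go]
      simp only [List.isPrefixOf, Bool.and_true]
      by_cases hc : a = c
      · subst hc
        simp only [beq_self_eq_true, if_pos]
        rw [show List.drop [a].length (a :: t) = t from rfl, ih t _ (by simpa using h)]
        simp [pvRep1]
      · rw [if_neg (by simp [hc]), ih t _ (by simpa using h)]
        simp [pvRep1, Ne.symm hc]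

lemma pv_replace_one (a : Char) (new l : List Char) :
    PySem.Chars.replace l [a] new = pvRep1 a new l := by
  rw [PySem.Chars.replace]
  simp [pv_replace_go_one a new l.length l [] le_rfl]

lemma pv_replace_go_two (a b : Char) (new : List Char) (fuel : Nat) :
    ∀ l acc : List Char, l.length ≤ fuel →
    PySem.Chars.replace.go [a, b] new fuel l acc = acc.reverse ++ pvRep2 a b new l := by
  induction fuel with
  | zero =>
    intro l acc h
    rw [PySem.Chars.replace.go]
    simp at h; simp [h, pvRep2]
  | succ n ih =>
    intro l acc h
    match l with
    | [] => rw [PySem.Chars.replace.go] <;> simp [pvRep2]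
    | [c] =>
      rw [PySem.Chars.replace.go, if_neg (by simp [List.isPrefixOf])]
      match n with
      | 0 => rw [PySem.Chars.replace.go]; simp [pvRep2]
      | m + 1 => rw [PySem.Chars.replace.go] <;> simp [pvRep2]
    | c :: d :: t =>
      rw [PySem.Chars.replace.go]
      by_cases hm : c = a ∧ d = b
      · obtain ⟨rfl, rfl⟩ := hm
        rw [if_pos (by simp [List.isPrefixOf])]
        rw [show List.drop [c, d].length (c :: d :: t) = t from rfl,
           ih t _ (by simp at h ⊢; omega)]
        rw [pvRep2, if_pos ⟨rfl, rfl⟩]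
        simp
      · rw [if_neg (by simp [List.isPrefixOf]; intro h1 h2; exact hm ⟨h1.symm, h2.symm⟩)]
        rw [ih (d :: t) _ (by simp at h ⊢; omega)]
        rw [pvRep2, if_neg hm]
        simp

lemma pv_replace_two (a b : Char) (new l : List Char) :
    PySem.Chars.replace l [a, b] new = pvRep2 a b new l := by
  rw [PySem.Chars.replace]
  simp [pv_replace_go_two a b new l.length l [] le_rfl]

-- the two bracket replaces are the pvPad flatMap ------------------------------

lemma pv_pad_eq (l : List Char) :
    pvRep1 ']' [']', ' '] (pvRep1 '[' [' ', '['] l) = l.flatMap pvPad := by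
  induction l with
  | nil => rfl
  | cons c t ih =>
    by_cases h1 : c = '[' <;> by_cases h2 : c = ']' <;>
      simp_all [pvRep1, pvPad, List.flatMap_append]

-- the three special-word replaces are pvMarkAll -------------------------------

lemma pvRep2_cons (a b x : Char) (new t : List Char)
    (h : ∀ y ys, t = y :: ys → ¬(x = a ∧ y = b)) :
    pvRep2 a b new (x :: t) = x :: pvRep2 a b new t := by
  match t with
  | [] => rfl
  | y :: ys => rw [pvRep2, if_neg (h y ys rfl)]

lemma pvRep2_cons_ne (a b x : Char) (new t : List Char) (h : x ≠ a) :
    pvRep2 a b new (x :: t) = x :: pvRep2 a b new t :=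
  pvRep2_cons a b x new t (fun _ _ _ hc => h hc.1)

lemma pvRep2_head (a b : Char) (nw l : List Char) (y : Char) (ys : List Char)
    (h : pvRep2 a b (' ' :: nw) l = y :: ys) : y = ' ' ∨ l.head? = some y := by
  match l with
  | [] => simp [pvRep2] at h
  | [c] => rw [show pvRep2 a b (' '::nw) [c] = [c] from rfl] at h; simp_all
  | c :: d :: t =>
    rw [pvRep2] at h
    split_ifs at h
    · simp at h; left; exact h.1.symm
    · simp at h; right; simp [h.1.symm]

lemma pvMark2_head (l : List Char) (y : Char) (ys : List Char)
    (h : pvMark2 l = y :: ys) : y = ' ' ∨ l.head? = some y := by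
  match l with
  | [] => simp [pvMark2] at h
  | [c] => rw [show pvMark2 [c] = [c] from rfl] at h; simp_all
  | c :: d :: t =>
    rw [pvMark2] at h
    split_ifs at h <;> simp at h
    · left; exact h.1.symm
    · left; exact h.1.symm
    · right; simp [h.1.symm]

lemma pvMark2_cons_ne (x : Char) (hx : x ≠ 'C' ∧ x ≠ 'B') (t : List Char) :
    pvMark2 (x :: t) = x :: pvMark2 t := by
  match t with
  | [] => rfl
  | y :: ys => rw [pvMark2, if_neg (fun h => hx.1 h.1), if_neg (fun h => hx.2 h.1)]

lemma pv_mark2_eq (l : List Char) :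
    pvRep2 'B' 'r' [' ', 'B', 'r', ' '] (pvRep2 'C' 'l' [' ', 'C', 'l', ' '] l) = pvMark2 l := by
  induction l using pvMark2.induct with
  | case1 => rfl
  | case2 c => rfl
  | case3 c d rest h ih =>
    obtain ⟨rfl, rfl⟩ := h
    rw [pvRep2, if_pos ⟨rfl, rfl⟩, pvMark2, if_pos ⟨rfl, rfl⟩]
    rw [show ([' ', 'C', 'l', ' '] ++ pvRep2 'C' 'l' [' ', 'C', 'l', ' '] rest)
        = ' ' :: 'C' :: 'l' :: ' ' :: pvRep2 'C' 'l' [' ', 'C', 'l', ' '] rest from rfl]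
    rw [pvRep2_cons_ne _ _ _ _ _ (by decide), pvRep2_cons_ne _ _ _ _ _ (by decide),
        pvRep2_cons_ne _ _ _ _ _ (by decide), pvRep2_cons_ne _ _ _ _ _ (by decide), ih]
  | case4 c d rest h1 h2 ih =>
    obtain ⟨rfl, rfl⟩ := h2
    rw [pvRep2_cons_ne 'C' 'l' 'B' _ _ (by decide), pvRep2_cons_ne 'C' 'l' 'r' _ _ (by decide)]
    rw [pvRep2, if_pos ⟨rfl, rfl⟩, pvMark2, if_neg h1, if_pos ⟨rfl, rfl⟩]
    rw [show ([' ', 'B', 'r', ' '] ++ pvRep2 'B' 'r' [' ', 'B', 'r', ' '] (pvRep2 'C' 'l' [' ', 'C', 'l', ' '] rest))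
        = ' ' :: 'B' :: 'r' :: ' ' :: pvRep2 'B' 'r' [' ', 'B', 'r', ' '] (pvRep2 'C' 'l' [' ', 'C', 'l', ' '] rest) from rfl]
    rw [ih]
  | case5 c d rest h1 h2 ih =>
    rw [pvRep2, if_neg h1, pvMark2, if_neg h1, if_neg h2]
    by_cases hc : c = 'B'
    · subst hc
      have hd : d ≠ 'r' := fun hd => h2 ⟨rfl, hd⟩
      rw [pvRep2_cons 'B' 'r' 'B' [' ', 'B', 'r', ' ']
            (pvRep2 'C' 'l' [' ', 'C', 'l', ' '] (d :: rest)) (by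
        rintro y ys hy ⟨-, rfl⟩
        rcases pvRep2_head _ _ _ _ _ _ hy with h | h
        · exact absurd h (by decide)
        · simp at h; exact hd h), ih]
    · rw [pvRep2_cons_ne _ _ _ _ _ hc, ih]

lemma pv_markAll_eq (l : List Char) :
    pvRep2 '=' 'O' [' ', '=', 'O', ' '] (pvMark2 l) = pvMarkAll l := by
  induction l using pvMarkAll.induct with
  | case1 => rfl
  | case2 c => rfl
  | case3 c d rest h ih =>
    obtain ⟨rfl, rfl⟩ := h
    rw [pvMark2, if_pos ⟨rfl, rfl⟩, pvMarkAll, if_pos ⟨rfl, rfl⟩]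
    rw [pvRep2_cons_ne _ _ _ _ _ (by decide), pvRep2_cons_ne _ _ _ _ _ (by decide),
        pvRep2_cons_ne _ _ _ _ _ (by decide), pvRep2_cons_ne _ _ _ _ _ (by decide), ih]
  | case4 c d rest h1 h2 ih =>
    obtain ⟨rfl, rfl⟩ := h2
    rw [pvMark2, if_neg h1, if_pos ⟨rfl, rfl⟩, pvMarkAll, if_neg h1, if_pos ⟨rfl, rfl⟩]
    rw [pvRep2_cons_ne _ _ _ _ _ (by decide), pvRep2_cons_ne _ _ _ _ _ (by decide),
        pvRep2_cons_ne _ _ _ _ _ (by decide), pvRep2_cons_ne _ _ _ _ _ (by decide), ih]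
  | case5 c d rest h1 h2 h3 ih =>
    obtain ⟨rfl, rfl⟩ := h3
    rw [pvMark2, if_neg h1, if_neg h2, pvMark2_cons_ne 'O' (by decide) rest,
        pvMarkAll, if_neg h1, if_neg h2, if_pos ⟨rfl, rfl⟩]
    rw [pvRep2, if_pos ⟨rfl, rfl⟩]
    rw [show ([' ', '=', 'O', ' '] ++ pvRep2 '=' 'O' [' ', '=', 'O', ' '] (pvMark2 rest))
        = ' ' :: '=' :: 'O' :: ' ' :: pvRep2 '=' 'O' [' ', '=', 'O', ' '] (pvMark2 rest) from rfl]
    rw [ih]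
  | case6 c d rest h1 h2 h3 ih =>
    rw [pvMark2, if_neg h1, if_neg h2, pvMarkAll, if_neg h1, if_neg h2, if_neg h3]
    by_cases hc : c = '='
    · subst hc
      have hd : d ≠ 'O' := fun hd => h3 ⟨rfl, hd⟩
      rw [pvRep2_cons '=' 'O' '=' [' ', '=', 'O', ' '] (pvMark2 (d :: rest)) (by
        rintro y ys hy ⟨-, rfl⟩
        rcases pvMark2_head _ _ _ hy with h | h
        · exact absurd h (by decide)
        · simp at h; exact hd h), ih]
    · rw [pvRep2_cons_ne _ _ _ _ _ hc, ih]

-- the same facts at the String level ------------------------------------------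

lemma pv_markAll_str (p : String) :
    (PySem.Str.replace (PySem.Str.replace (PySem.Str.replace p "Cl" " Cl ") "Br" " Br ") "=O" " =O ").toList
      = pvMarkAll p.toList := by
  simp only [PySem.Str.toList_replace]
  rw [show ("Cl" : String).toList = ['C', 'l'] from rfl,
      show ("Br" : String).toList = ['B', 'r'] from rfl,
      show ("=O" : String).toList = ['=', 'O'] from rfl,
      show (" Cl " : String).toList = [' ', 'C', 'l', ' '] from rfl,
      show (" Br " : String).toList = [' ', 'B', 'r', ' '] from rfl,
      show (" =O " : String).toList = [' ', '=', 'O', ' '] from rfl]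
  rw [pv_replace_two, pv_replace_two, pv_replace_two, pv_mark2_eq, pv_markAll_eq]

lemma pv_pad_str (s : String) :
    (PySem.Str.replace (PySem.Str.replace s "[" " [") "]" "] ").toList = s.toList.flatMap pvPad := by
  simp only [PySem.Str.toList_replace]
  rw [show ("[" : String).toList = ['['] from rfl,
      show ("]" : String).toList = [']'] from rfl,
      show (" [" : String).toList = [' ', '['] from rfl,
      show ("] " : String).toList = [']', ' '] from rfl]
  rw [pv_replace_one, pv_replace_one]
  exact pv_pad_eq s.toList

-- chunking --------------------------------------------------------------------

lemma pv_isspace_lbr : PySem.Chars.isspace '[' = false := by decide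
lemma pv_isspace_rbr : PySem.Chars.isspace ']' = false := by decide
lemma pv_isspace_sp : PySem.Chars.isspace ' ' = true := by decide

lemma pv_chunks_eq (s : List Char) : ∀ cur, pvWgo (s.flatMap pvPad) cur = pvCgo s cur := by
  induction s with
  | nil => intro cur; rfl
  | cons c rest ih =>
    intro cur
    rw [List.flatMap_cons]
    by_cases h1 : c = '['
    · subst h1
      by_cases hc : cur = [] <;>
        simp [pvPad, pvWgo, pvCgo, hc, ih, pv_isspace_lbr, pv_isspace_sp]
    · by_cases h2 : c = ']'
      · subst h2
        by_cases hc : cur = [] <;>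
          simp [pvPad, pvWgo, pvCgo, hc, ih, pv_isspace_rbr, pv_isspace_sp]
      · by_cases hs : PySem.Chars.isspace c <;> by_cases hc : cur = [] <;>
          simp [pvPad, pvWgo, pvCgo, h1, h2, hs, hc, ih]

lemma pv_chunks_nospace (s : List Char) :
    ∀ cur, (∀ c ∈ cur, PySem.Chars.isspace c = false) →
    ∀ piece ∈ pvCgo s cur, ∀ c ∈ piece, PySem.Chars.isspace c = false := by
  induction s with
  | nil =>
    intro cur hcur piece hp c hc
    rw [pvCgo] at hp
    split_ifs at hp <;> simp at hp
    subst hp; exact hcur c (by simpa using hc)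
  | cons x rest ih =>
    intro cur hcur piece hp c hc
    rw [pvCgo] at hp
    by_cases hs : PySem.Chars.isspace x
    · rw [if_pos hs] at hp
      by_cases hcn : cur = []
      · rw [if_pos hcn] at hp; exact ih [] (by simp) piece hp c hc
      · rw [if_neg hcn] at hp
        rcases List.mem_cons.mp hp with rfl | hp'
        · exact hcur c (by simpa using hc)
        · exact ih [] (by simp) piece hp' c hc
    · rw [if_neg hs] at hp
      by_cases h1 : x = '['
      · rw [if_pos h1] at hp
        have hb : ∀ a ∈ ['['], PySem.Chars.isspace a = false := by
          intro a ha; simp at ha; subst ha; exact pv_isspace_lbr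
        by_cases hcn : cur = []
        · rw [if_pos hcn] at hp; exact ih ['['] hb piece hp c hc
        · rw [if_neg hcn] at hp
          rcases List.mem_cons.mp hp with rfl | hp'
          · exact hcur c (by simpa using hc)
          · exact ih ['['] hb piece hp' c hc
      · rw [if_neg h1] at hp
        by_cases h2 : x = ']'
        · rw [if_pos h2] at hp
          rcases List.mem_cons.mp hp with rfl | hp'
          · simp at hc
            rcases hc with hc | rfl
            · exact hcur c hc
            · exact pv_isspace_rbr
          · exact ih [] (by simp) piece hp' c hc
        · rw [if_neg h2] at hp
          refine ih (x :: cur) ?_ piece hp c hc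
          intro a ha
          rcases List.mem_cons.mp ha with rfl | ha'
          · simpa using hs
          · exact hcur a ha'

-- the tokenizer agreement on a whitespace-free piece ---------------------------

lemma pv_snoc_mem_words (cur : List Char) (c : Char)
    (h : cur.reverse ++ [c] ∈ pvWordsL) : ∃ x, cur = [x] ∧ [x, c] ∈ pvWordsL := by
  have hlen : (cur.reverse ++ [c]).length = 2 := by
    simp [pvWordsL] at h
    rcases h with h | h | h <;> rw [h] <;> rfl
  have hc1 : cur.length = 1 := by simp at hlen; omega
  match cur, hc1 with
  | [x], _ =>
    refine ⟨x, rfl, ?_⟩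
    simpa using h

lemma pv_explode_append (l1 l2 : List Char) :
    pvExplode (l1 ++ l2) = pvExplode l1 ++ pvExplode l2 := by
  simp [pvExplode]

lemma pv_classify_notword (l : List Char) (h : l ∉ pvWordsL) :
    pvClassify l = pvExplode l := by
  rw [pvClassify, if_neg h]

lemma pv_tok_eq (p : List Char) :
    (∀ c ∈ p, PySem.Chars.isspace c = false) →
    ∀ cur : List Char, cur.reverse ∉ pvWordsL →
    (∀ x xs y ys, cur = x :: xs → p = y :: ys → [x, y] ∉ pvWordsL) →
    (pvWgo (pvMarkAll p) cur).flatMap pvClassify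
      = pvExplode cur.reverse ++ pvTokenize p := by
  induction p using pvMarkAll.induct with
  | case1 =>
    intro _ cur hcur _
    rw [pvMarkAll, pvWgo, pvTokenize]
    by_cases hc : cur = []
    · simp [hc, pvExplode]
    · rw [if_neg hc]
      simp [pv_classify_notword _ hcur]
  | case2 c =>
    intro hp cur hcur h3
    rw [pvMarkAll, pvWgo, if_neg (by simp [hp c (by simp)])]
    rw [pvWgo, if_neg (by simp)]
    have hnw : (c :: cur).reverse ∉ pvWordsL := by
      intro hmem
      rw [List.reverse_cons] at hmem
      obtain ⟨x, rfl, hx⟩ := pv_snoc_mem_words cur c hmem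
      exact h3 x [] c [] rfl rfl hx
    simp only [List.flatMap_cons, List.flatMap_nil, List.append_nil]
    rw [pv_classify_notword _ hnw, List.reverse_cons, pv_explode_append]
    rfl
  | case3 c d rest h ih =>
    intro hp cur hcur _
    obtain ⟨rfl, rfl⟩ := h
    rw [pvMarkAll, if_pos ⟨rfl, rfl⟩, pvTokenize, if_pos ⟨rfl, rfl⟩]
    rw [pvWgo, if_pos (by decide)]
    have hrec := ih (fun c hc => hp c (by simp [hc])) [] (by simp [pvWordsL])
      (by rintro x xs y ys h - ; simp at h)
    have hstep : pvWgo ('C' :: 'l' :: ' ' :: pvMarkAll rest) []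
        = ['C', 'l'] :: pvWgo (pvMarkAll rest) [] := by
      rw [pvWgo, if_neg (by decide), pvWgo, if_neg (by decide),
          pvWgo, if_pos (by decide), if_neg (by simp)]
      rfl
    by_cases hc : cur = []
    · simp only [hc, reduceIte, hstep, List.flatMap_cons, hrec]
      simp [pvClassify, pvWordsL, pvExplode]
    · rw [if_neg hc]
      simp only [hstep, List.flatMap_cons, hrec]
      rw [pv_classify_notword _ hcur]
      simp [pvClassify, pvWordsL, pvExplode]
  | case4 c d rest h1 h2 ih =>
    intro hp cur hcur _
    obtain ⟨rfl, rfl⟩ := h2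
    rw [pvMarkAll, if_neg h1, if_pos ⟨rfl, rfl⟩, pvTokenize, if_neg h1, if_pos ⟨rfl, rfl⟩]
    rw [pvWgo, if_pos (by decide)]
    have hrec := ih (fun c hc => hp c (by simp [hc])) [] (by simp [pvWordsL])
      (by rintro x xs y ys h - ; simp at h)
    have hstep : pvWgo ('B' :: 'r' :: ' ' :: pvMarkAll rest) []
        = ['B', 'r'] :: pvWgo (pvMarkAll rest) [] := by
      rw [pvWgo, if_neg (by decide), pvWgo, if_neg (by decide),
          pvWgo, if_pos (by decide), if_neg (by simp)]
      rfl
    by_cases hc : cur = []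
    · simp only [hc, reduceIte, hstep, List.flatMap_cons, hrec]
      simp [pvClassify, pvWordsL, pvExplode]
    · rw [if_neg hc]
      simp only [hstep, List.flatMap_cons, hrec]
      rw [pv_classify_notword _ hcur]
      simp [pvClassify, pvWordsL, pvExplode]
  | case5 c d rest h1 h2 h3 ih =>
    intro hp cur hcur _
    obtain ⟨rfl, rfl⟩ := h3
    rw [pvMarkAll, if_neg h1, if_neg h2, if_pos ⟨rfl, rfl⟩,
        pvTokenize, if_neg h1, if_neg h2, if_pos ⟨rfl, rfl⟩]
    rw [pvWgo, if_pos (by decide)]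
    have hrec := ih (fun c hc => hp c (by simp [hc])) [] (by simp [pvWordsL])
      (by rintro x xs y ys h - ; simp at h)
    have hstep : pvWgo ('=' :: 'O' :: ' ' :: pvMarkAll rest) []
        = ['=', 'O'] :: pvWgo (pvMarkAll rest) [] := by
      rw [pvWgo, if_neg (by decide), pvWgo, if_neg (by decide),
          pvWgo, if_pos (by decide), if_neg (by simp)]
      rfl
    by_cases hc : cur = []
    · simp only [hc, reduceIte, hstep, List.flatMap_cons, hrec]
      simp [pvClassify, pvWordsL, pvExplode]
    · rw [if_neg hc]
      simp only [hstep, List.flatMap_cons, hrec]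
      rw [pv_classify_notword _ hcur]
      simp [pvClassify, pvWordsL, pvExplode]
  | case6 c d rest h1 h2 h3 ih =>
    intro hp cur hcur h4
    rw [pvMarkAll, if_neg h1, if_neg h2, if_neg h3,
        pvTokenize, if_neg h1, if_neg h2, if_neg h3]
    rw [pvWgo, if_neg (by simp [hp c (by simp)])]
    have hnw : (c :: cur).reverse ∉ pvWordsL := by
      intro hmem
      rw [List.reverse_cons] at hmem
      obtain ⟨x, rfl, hx⟩ := pv_snoc_mem_words cur c hmem
      exact h4 x [] c (d :: rest) rfl rfl hx
    have h4' : ∀ x xs y ys, c :: cur = x :: xs → d :: rest = y :: ys →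
        [x, y] ∉ pvWordsL := by
      rintro x xs y ys hx hy hmem
      cases hx; cases hy
      simp [pvWordsL] at hmem
      rcases hmem with ⟨rfl, rfl⟩ | ⟨rfl, rfl⟩ | ⟨rfl, rfl⟩
      · exact h1 ⟨rfl, rfl⟩
      · exact h2 ⟨rfl, rfl⟩
      · exact h3 ⟨rfl, rfl⟩
    rw [ih (fun a ha => hp a (by simp at ha ⊢; tauto)) (c :: cur) hnw h4']
    rw [List.reverse_cons, pv_explode_append]
    simp [pvExplode]

-- A reduced to chunks ----------------------------------------------------------

lemma pv_mem_spec_words (sub : String) : sub ∈ spec_words ↔ sub.toList ∈ pvWordsL := by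
  simp only [spec_words, pvWordsL, List.mem_cons, List.not_mem_nil, or_false]
  rw [show (['C','l'] = ("Cl" : String).toList) from rfl,
      show (['B','r'] = ("Br" : String).toList) from rfl,
      show (['=','O'] = ("=O" : String).toList) from rfl]
  simp only [String.toList_inj]

lemma pv_classify_str (sub : String) :
    (if sub ∈ spec_words then [sub] else sub.toList.map (fun c => String.ofList [c]))
      = pvClassify sub.toList := by
  rw [pvClassify]
  by_cases h : sub ∈ spec_words
  · rw [if_pos h, if_pos ((pv_mem_spec_words sub).mp h), String.ofList_toList]
  · rw [if_neg h, if_neg (fun hm => h ((pv_mem_spec_words sub).mpr hm))]; rfl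

lemma pv_foldl_classify (l : List String) (acc : List String) :
    l.foldl (fun fp subpiece =>
        if subpiece ∈ spec_words then fp ++ [subpiece]
        else fp ++ subpiece.toList.map (fun c => String.ofList [c])) acc
      = acc ++ l.flatMap (fun sub => pvClassify sub.toList) := by
  induction l generalizing acc with
  | nil => simp
  | cons x t ih =>
    rw [List.foldl_cons, List.flatMap_cons, ih]
    by_cases h : x ∈ spec_words <;>
      simp [h, ← pv_classify_str, List.append_assoc]

lemma pv_gstr (piece : String) :
    (if PySem.Str.isIn "[" piece || PySem.Str.isIn "]" piece then [piece]
     else (PySem.Str.split₀ (spec_words.foldl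
        (fun p word => PySem.Str.replace p word (" " ++ word ++ " ")) piece)).flatMap
          (fun sub => pvClassify sub.toList))
      = pvPieceA piece.toList := by
  rw [pvPieceA]
  simp only [PySem.Str.isIn_eq, show ("[" : String).toList = ['['] from rfl,
    show ("]" : String).toList = [']'] from rfl]
  cases h : (PySem.Chars.isIn ['['] piece.toList || PySem.Chars.isIn [']'] piece.toList)
  case true =>
    simp only [h, if_pos, reduceIte, String.ofList_toList]
  case false =>
    simp only [h, Bool.false_eq_true, if_neg, reduceIte]
    rw [show spec_words.foldl (fun p word => PySem.Str.replace p word (" " ++ word ++ " ")) piece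
        = PySem.Str.replace (PySem.Str.replace (PySem.Str.replace piece "Cl" " Cl ") "Br" " Br ") "=O" " =O " from rfl]
    rw [← List.flatMap_map String.toList pvClassify, PySem.Str.split₀_map_toList, pv_markAll_str,
        pv_split₀_eq]

set_option maxHeartbeats 1000000 in
lemma pv_hout : ∀ (l : List String) (acc : List String),
      l.foldl (fun fproc_list piece =>
        if PySem.Str.isIn "[" piece || PySem.Str.isIn "]" piece then
          fproc_list ++ [piece]
        else
          (PySem.Str.split₀ (spec_words.foldl (fun p word => PySem.Str.replace p word (" " ++ word ++ " ")) piece)).foldl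
            (fun fp subpiece =>
              if subpiece ∈ spec_words then fp ++ [subpiece]
              else fp ++ subpiece.toList.map (fun c => String.ofList [c])) fproc_list) acc
      = acc ++ (l.map String.toList).flatMap pvPieceA := by
  intro l
  induction l with
  | nil => intro acc; simp
  | cons x t ih =>
    intro acc
    rw [List.foldl_cons, List.map_cons, List.flatMap_cons]
    by_cases h : (PySem.Str.isIn "[" x || PySem.Str.isIn "]" x) = true
    · rw [if_pos h, ih, ← pv_gstr, if_pos h, List.append_assoc]
    · rw [if_neg h, pv_foldl_classify, ih, ← pv_gstr, if_neg h, List.append_assoc]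

lemma pv_A_eq (s : String) :
    parse_smiles s = (pvCgo s.toList []).flatMap pvPieceA := by
  have h := pv_hout (PySem.Str.split₀
      (PySem.Str.replace (PySem.Str.replace s "[" " [") "]" "] ")) []
  rw [List.nil_append, PySem.Str.split₀_map_toList, pv_pad_str, pv_split₀_eq, pv_chunks_eq] at h
  exact h

-- B reduced to chunks ----------------------------------------------------------

lemma pv_flush_eq (chunk : List Char) (toks : List String) :
    pvFlush chunk toks = toks ++ (if chunk = [] then [] else pvPieceB chunk) := by
  rw [pvFlush, pvPieceB]
  by_cases h : chunk = []
  · simp [h]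
  · rw [if_neg h, if_neg h]
    simp only [PySem.Str.isIn_eq, String.toList_ofList,
      show ("[" : String).toList = ['['] from rfl, show ("]" : String).toList = [']'] from rfl]
    cases hb : (PySem.Chars.isIn ['['] chunk || PySem.Chars.isIn [']'] chunk) <;>
      simp [hb, String.ofList]

lemma pv_scan_eq (s : List Char) :
    ∀ (cur : List Char) (toks : List String),
    pvScan s cur.reverse toks = toks ++ (pvCgo s cur).flatMap pvPieceB := by
  induction s with
  | nil =>
    intro cur toks
    rw [pvScan, pvCgo, pv_flush_eq]
    by_cases h : cur = []
    · simp [h]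
    · rw [if_neg h, if_neg (by simpa using h)]
      simp
  | cons c rest ih =>
    intro cur toks
    rw [pvScan, pvCgo]
    by_cases hs : PySem.Chars.isspace c
    · rw [if_pos hs, if_pos hs, pv_flush_eq]
      by_cases h : cur = []
      · rw [if_pos h, if_pos (by simpa using h), List.append_nil]
        exact ih [] toks
      · rw [if_neg h, if_neg (by simpa using h), List.flatMap_cons, ← List.append_assoc]
        rw [show pvPieceB cur.reverse = (if cur.reverse = [] then [] else pvPieceB cur.reverse) from by
          rw [if_neg (by simpa using h)]]
        exact ih [] _
    · rw [if_neg hs, if_neg hs]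
      by_cases h1 : c = '['
      · rw [if_pos h1, if_pos h1, pv_flush_eq]
        by_cases h : cur = []
        · rw [if_pos h, if_pos (by simpa using h), List.append_nil]
          exact ih ['['] toks
        · rw [if_neg h, if_neg (by simpa using h), List.flatMap_cons, ← List.append_assoc]
          rw [show pvPieceB cur.reverse = (if cur.reverse = [] then [] else pvPieceB cur.reverse) from by
            rw [if_neg (by simpa using h)]]
          exact ih ['['] _
      · rw [if_neg h1, if_neg h1]
        by_cases h2 : c = ']'
        · subst h2
          rw [if_pos rfl, if_pos rfl, pv_flush_eq]
          rw [if_neg (by simp), List.flatMap_cons, ← List.append_assoc, List.reverse_cons]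
          exact ih [] _
        · rw [if_neg h2, if_neg h2]
          rw [show cur.reverse ++ [c] = (c :: cur).reverse from (List.reverse_cons).symm]
          exact ih (c :: cur) toks

lemma pv_B_eq (s : String) :
    parse_smiles_alt s = (pvCgo s.toList []).flatMap pvPieceB := by
  rw [parse_smiles_alt]
  have h := pv_scan_eq s.toList [] []
  simpa using h

-- per-piece agreement ----------------------------------------------------------

lemma pv_piece_eq (l : List Char) (hl : ∀ c ∈ l, PySem.Chars.isspace c = false) :
    pvPieceA l = pvPieceB l := by
  rw [pvPieceA, pvPieceB]
  cases hb : (PySem.Chars.isIn ['['] l || PySem.Chars.isIn [']'] l)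
  · simp only [hb, Bool.false_eq_true, reduceIte]
    rw [pv_split₀_eq]
    have h := pv_tok_eq l hl [] (by simp [pvWordsL]) (by rintro x xs y ys h -; simp at h)
    simpa [pvExplode] using h
  · simp [hb]

-- ===== VERDICT (by name: the statement is the Claim_ definition above) =====
theorem parse_smiles_spec : Claim_equal_parse_smiles := by
  intro s _
  unfold Spec_parse_smiles
  rw [pv_A_eq, pv_B_eq]
  unfold List.flatMap
  congr 1
  apply List.map_congr_left
  intro piece hpiece
  exact pv_piece_eq piece (pv_chunks_nospace s.toList [] (by simp) piece hpiece)
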